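-- pv_equiv track=rewrite | github.com/coderextreme/x3danari | skinned_x3d_renderer.py | parse_x3d_coord_index
-- ===== SOURCE A (Python) =====
-- def parse_x3d_coord_index(coord_index):
--     if not coord_index: return []
--     flat_indices, polygons, current_poly = list(coord_index), [], []
--     for idx in flat_indices:
--         if idx == -1:
--             if len(current_poly) >= 3: polygons.append(current_poly)
--             current_poly = []
--         else: current_poly.append(idx)
--     if len(current_poly) >= 3: polygons.append(current_poly)
--     triangles = []
--     for poly in polygons:
--         for i in range(1, len(poly) - 1): triangles.extend([poly[0], poly[i], poly[i + 1]])
--     return triangles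
-- ===== SOURCE B (Python) =====
-- def parse_x3d_coord_index(coord_index):
--     # single pass: emit fan triangles on the fly, keeping only three scalars
--     triangles = []
--     anchor = prev = 0
--     count = 0
--     for idx in coord_index:
--         if idx == -1:
--             anchor = prev = 0
--             count = 0
--         elif count == 0:
--             anchor = idx
--             count = 1
--         elif count == 1:
--             prev = idx
--             count = 2
--         else:
--             triangles += [anchor, prev, idx]
--             prev = idx
--             count += 1
--     return triangles
-- ===== Notes on version B (the rewrite author's own statement) =====
-- stated objective: alternative
-- what changed: B replaces A's two-phase pipeline (group indices into a list of polygon lists, then fan-triangulate each by indexed range loops) with a single streaming pass that keeps only three scalars (anchor, prev, count) and emits each triangle the moment its third vertex arrives, building no intermediate polygon lists.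
import Mathlib
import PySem

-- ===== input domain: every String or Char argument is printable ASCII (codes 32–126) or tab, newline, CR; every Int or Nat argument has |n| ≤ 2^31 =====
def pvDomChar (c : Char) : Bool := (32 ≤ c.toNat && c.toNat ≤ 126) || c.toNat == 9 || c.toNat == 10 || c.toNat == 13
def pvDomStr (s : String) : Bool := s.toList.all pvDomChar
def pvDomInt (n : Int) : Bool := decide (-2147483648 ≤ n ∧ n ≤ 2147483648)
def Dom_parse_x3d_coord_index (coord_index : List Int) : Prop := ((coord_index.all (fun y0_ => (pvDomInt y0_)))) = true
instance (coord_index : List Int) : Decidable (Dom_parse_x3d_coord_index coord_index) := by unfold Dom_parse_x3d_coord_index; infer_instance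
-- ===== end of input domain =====

-- B is a single streaming pass (anchor/prev/count scalars, triangles emitted on the fly)
-- instead of A's two-phase grouping into polygon lists followed by indexed fan loops; same cost.

-- ===== PORT A =====
-- one step of A's grouping loop: on -1 flush current_poly (if len >= 3) and reset, else append idx
def pvStepA (s : List (List Int) × List Int) (idx : Int) : List (List Int) × List Int :=
  if idx = -1 then (if 3 ≤ s.2.length then s.1 ++ [s.2] else s.1, [])
  else (s.1, s.2 ++ [idx])

-- A's inner loop: for i in range(1, len(poly)-1): triangles.extend([poly[0], poly[i], poly[i+1]])
def pvFanLoop (poly : List Int) (triangles : List Int) : List Int :=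
  (PySem.List.pyRange 1 ((poly.length : Int) - 1) 1).foldl
    (fun tr2 i => tr2 ++ [PySem.List.pyGetD poly 0 0, PySem.List.pyGetD poly i 0,
                          PySem.List.pyGetD poly (i + 1) 0]) triangles

def parse_x3d_coord_index (coord_index : List Int) : List Int :=
  if coord_index = [] then []
  else
    let s := coord_index.foldl pvStepA ([], [])
    let polygons := if 3 ≤ s.2.length then s.1 ++ [s.2] else s.1
    polygons.foldl (fun triangles poly => pvFanLoop poly triangles) []

-- ===== PORT B =====
-- one step of B's single pass; state = (triangles, anchor, prev, count)
def pvStepB (s : List Int × Int × Int × Nat) (idx : Int) : List Int × Int × Int × Nat :=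
  if idx = -1 then (s.1, 0, 0, 0)
  else if s.2.2.2 = 0 then (s.1, idx, s.2.2.1, 1)
  else if s.2.2.2 = 1 then (s.1, s.2.1, idx, 2)
  else (s.1 ++ [s.2.1, s.2.2.1, idx], s.2.1, idx, s.2.2.2 + 1)

def parse_x3d_coord_index_alt (coord_index : List Int) : List Int :=
  (coord_index.foldl pvStepB ([], 0, 0, 0)).1

-- ===== PRECONDITION & SPEC =====
def Spec_parse_x3d_coord_index (coord_index : List Int) (out : List Int) : Prop := out = parse_x3d_coord_index_alt coord_index
instance (coord_index : List Int) (out : List Int) : Decidable (Spec_parse_x3d_coord_index coord_index out) := by unfold Spec_parse_x3d_coord_index; infer_instance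

-- ===== CLAIM (what is proved, stated in full; the proofs are below) =====
def Claim_equal_parse_x3d_coord_index : Prop := ∀ (coord_index : List Int), Dom_parse_x3d_coord_index coord_index → Spec_parse_x3d_coord_index coord_index (parse_x3d_coord_index coord_index)

-- ===== LEMMAS AND PROOFS =====

-- fan triangulation of a polygon with first vertex a, previous vertex p and remaining vertices
def pvFan : Int → Int → List Int → List Int
  | _, _, [] => []
  | a, p, x :: xs => a :: p :: x :: pvFan a x xs

-- triangles of one polygon list
def pvTri : List Int → List Int
  | a :: b :: rest => pvFan a b rest
  | _ => []

-- recursive form of A's grouping loop (plus final flush)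
def pvPolysFrom : List Int → List Int → List (List Int)
  | [], cur => if 3 ≤ cur.length then [cur] else []
  | x :: xs, cur =>
    if x = -1 then (if 3 ≤ cur.length then cur :: pvPolysFrom xs [] else pvPolysFrom xs [])
    else pvPolysFrom xs (cur ++ [x])

-- recursive form of B's emission from a mid-loop state
def pvEmitFrom : List Int → Int → Int → Nat → List Int
  | [], _, _, _ => []
  | x :: xs, a, p, c =>
    if x = -1 then pvEmitFrom xs 0 0 0
    else if c = 0 then pvEmitFrom xs x p 1
    else if c = 1 then pvEmitFrom xs a x 2
    else a :: p :: x :: pvEmitFrom xs a x (c + 1)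

lemma pvTri_short (cur : List Int) (h : cur.length < 3) : pvTri cur = [] := by
  match cur with
  | [] => rfl
  | [_] => rfl
  | [_, _] => rfl
  | _ :: _ :: _ :: _ => exact absurd h (by simp)

lemma pvStepA_fold : ∀ (xs : List Int) (polys : List (List Int)) (cur : List Int),
    (if 3 ≤ (xs.foldl pvStepA (polys, cur)).2.length
     then (xs.foldl pvStepA (polys, cur)).1 ++ [(xs.foldl pvStepA (polys, cur)).2]
     else (xs.foldl pvStepA (polys, cur)).1)
    = polys ++ pvPolysFrom xs cur := by
  intro xs
  induction xs with
  | nil => intro polys cur; simp [pvPolysFrom]; split_ifs <;> simp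
  | cons x xs ih =>
    intro polys cur
    by_cases hx : x = -1
    · by_cases hl : 3 ≤ cur.length
      · simp [List.foldl_cons, pvStepA, hx, hl, pvPolysFrom, ih]
      · simp [List.foldl_cons, pvStepA, hx, hl, pvPolysFrom, ih]
    · simp [List.foldl_cons, pvStepA, hx, pvPolysFrom, ih]

lemma pvStepB_fold : ∀ (xs : List Int) (tris : List Int) (a p : Int) (c : Nat),
    (xs.foldl pvStepB (tris, a, p, c)).1 = tris ++ pvEmitFrom xs a p c := by
  intro xs
  induction xs with
  | nil => intro tris a p c; simp [pvEmitFrom]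
  | cons x xs ih =>
    intro tris a p c
    by_cases hx : x = -1
    · simp [List.foldl_cons, pvStepB, hx, pvEmitFrom, ih]
    · by_cases h0 : c = 0
      · simp [List.foldl_cons, pvStepB, hx, h0, pvEmitFrom, ih]
      · by_cases h1 : c = 1
        · simp [List.foldl_cons, pvStepB, hx, h1, pvEmitFrom, ih]
        · simp [List.foldl_cons, pvStepB, hx, h0, h1, pvEmitFrom, ih]

lemma pvFanAux : ∀ (n : Nat) (poly : List Int) (s : Nat) (tr : List Int),
    1 ≤ s → poly.length ≤ s + n →
    (PySem.List.pyRange (s : Int) ((poly.length : Int) - 1) 1).foldl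
      (fun tr2 i => tr2 ++ [PySem.List.pyGetD poly 0 0, PySem.List.pyGetD poly i 0,
                            PySem.List.pyGetD poly (i + 1) 0]) tr
    = tr ++ pvFan (poly.getD 0 0) (poly.getD s 0) (poly.drop (s + 1)) := by
  intro n
  induction n with
  | zero =>
    intro poly s tr hs hn
    rw [PySem.List.pyRange_one_eq_nil (by omega)]
    rw [List.drop_eq_nil_of_le (by omega)]
    simp [pvFan]
  | succ n ih =>
    intro poly s tr hs hn
    by_cases h : (s : Int) < (poly.length : Int) - 1
    · have hs1 : s + 1 < poly.length := by omega
      rw [PySem.List.pyRange_one_cons h]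
      rw [List.foldl_cons]
      have hcast : (s : Int) + 1 = ((s + 1 : Nat) : Int) := by push_cast; ring
      rw [hcast]
      rw [ih poly (s + 1) _ (by omega) (by omega)]
      rw [List.drop_eq_getElem_cons hs1]
      simp only [PySem.List.pyGetD_natCast]
      rw [List.getD_eq_getElem _ _ hs1]
      simp [pvFan, PySem.List.pyGetD_zero]
    · rw [PySem.List.pyRange_one_eq_nil (by omega)]
      rw [List.drop_eq_nil_of_le (by omega)]
      simp [pvFan]

lemma pvFanLoop_eq (poly tr : List Int) : pvFanLoop poly tr = tr ++ pvTri poly := by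
  match poly with
  | [] =>
    unfold pvFanLoop
    rw [PySem.List.pyRange_one_eq_nil (by simp)]
    simp [pvTri]
  | [a] =>
    unfold pvFanLoop
    rw [PySem.List.pyRange_one_eq_nil (by simp)]
    simp [pvTri]
  | a :: b :: rest =>
    unfold pvFanLoop
    have h := pvFanAux (a :: b :: rest).length (a :: b :: rest) 1 tr (by omega) (by omega)
    simp only [Nat.cast_one] at h
    rw [h]
    simp [pvTri, List.getD]

lemma pvFoldl_fanLoop : ∀ (ps : List (List Int)) (tr : List Int),
    ps.foldl (fun triangles poly => pvFanLoop poly triangles) tr = tr ++ ps.flatMap pvTri := by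
  intro ps
  induction ps with
  | nil => intro tr; simp
  | cons p ps ih => intro tr; simp [List.foldl_cons, pvFanLoop_eq, ih, List.flatMap]

lemma pvFan_append : ∀ (l : List Int) (a b x q : Int), (b :: l).getLast? = some q →
    pvFan a b (l ++ [x]) = pvFan a b l ++ [a, q, x] := by
  intro l
  induction l with
  | nil =>
    intro a b x q hq
    simp at hq
    simp [pvFan, hq]
  | cons y ys ih =>
    intro a b x q hq
    rw [List.getLast?_cons_cons] at hq
    simp only [List.cons_append, pvFan]
    rw [ih a y x q hq]

lemma pvCrux : ∀ (xs cur : List Int) (a p : Int) (c : Nat),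
    c = cur.length →
    (cur ≠ [] → cur.head? = some a) →
    (2 ≤ c → cur.getLast? = some p) →
    pvTri cur ++ pvEmitFrom xs a p c = (pvPolysFrom xs cur).flatMap pvTri := by
  intro xs
  induction xs with
  | nil =>
    intro cur a p c _ _ _
    simp only [pvEmitFrom, pvPolysFrom, List.append_nil]
    split_ifs with h
    · simp
    · simp [pvTri_short cur (by omega)]
  | cons x xs ih =>
    intro cur a p c hc hh hl
    by_cases hx : x = -1
    · have hIH := ih [] 0 0 0 rfl (by simp) (by omega)
      simp only [pvTri] at hIH
      simp only [pvEmitFrom, pvPolysFrom, hx, if_true]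
      split_ifs with h3
      · simp [← hIH]
      · simp [← hIH, pvTri_short cur (by omega)]
    · by_cases h0 : c = 0
      · have hcur : cur = [] := by
          cases cur with
          | nil => rfl
          | cons y ys => simp [h0] at hc
        subst hcur
        have hIH := ih [x] x p 1 rfl (by simp) (by omega)
        simp only [pvTri] at hIH
        simp [pvEmitFrom, pvPolysFrom, hx, h0, hIH, pvTri]
      · by_cases h1 : c = 1
        · obtain ⟨y, hy⟩ : ∃ y, cur = [y] := by
            cases cur with
            | nil => simp [h1] at hc
            | cons y ys =>
              cases ys with
              | nil => exact ⟨y, rfl⟩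
              | cons z zs => simp [h1] at hc
          have hya : a = y := by
            have := hh (by simp [hy])
            simp [hy] at this
            omega
          subst hy; subst hya
          have hIH := ih [a, x] a x 2 rfl (by simp) (by simp)
          simp only [pvTri, pvFan] at hIH
          simp [pvEmitFrom, pvPolysFrom, hx, h1, hIH, pvTri]
        · -- c ≥ 2 : cur = a :: z :: rest
          have h2 : 2 ≤ c := by omega
          obtain ⟨y, z, rest, hcur⟩ : ∃ y z rest, cur = y :: z :: rest := by
            cases cur with
            | nil => simp at hc; omega
            | cons y ys =>
              cases ys with
              | nil => simp at hc; omega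
              | cons z zs => exact ⟨y, z, zs, rfl⟩
          have hya : a = y := by
            have := hh (by simp [hcur])
            simp [hcur] at this
            omega
          subst hcur; subst hya
          have hp : (z :: rest).getLast? = some p := by
            have := hl h2
            rwa [List.getLast?_cons_cons] at this
          have hIH := ih ((a :: z :: rest) ++ [x]) a x (c + 1)
            (by simp [hc]) (by simp)
            (by intro _; exact List.getLast?_concat)
          have htri : pvTri ((a :: z :: rest) ++ [x]) = pvTri (a :: z :: rest) ++ [a, p, x] := by
            simp only [List.cons_append, pvTri]
            exact pvFan_append rest a z x p hp
          rw [htri] at hIH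
          calc pvTri (a :: z :: rest) ++ pvEmitFrom (x :: xs) a p c
              = (pvTri (a :: z :: rest) ++ [a, p, x]) ++ pvEmitFrom xs a x (c + 1) := by
                simp [pvEmitFrom, hx, h0, h1]
            _ = List.flatMap pvTri (pvPolysFrom (x :: xs) (a :: z :: rest)) := by
                rw [hIH]
                simp [pvPolysFrom, hx]
-- ===== VERDICT (by name: the statement is the Claim_ definition above) =====
theorem parse_x3d_coord_index_spec : Claim_equal_parse_x3d_coord_index := by
  intro ci _
  unfold Spec_parse_x3d_coord_index parse_x3d_coord_index parse_x3d_coord_index_alt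
  by_cases h : ci = []
  · subst h; simp
  · simp only [h, if_false]
    rw [pvStepB_fold ci [] 0 0 0]
    have hA := pvStepA_fold ci [] []
    simp only [List.nil_append] at hA
    -- fold the let-bound polygons into the closed form
    show (if 3 ≤ (ci.foldl pvStepA ([], [])).2.length
          then (ci.foldl pvStepA ([], [])).1 ++ [(ci.foldl pvStepA ([], [])).2]
          else (ci.foldl pvStepA ([], [])).1).foldl
            (fun triangles poly => pvFanLoop poly triangles) [] = _
    rw [hA, pvFoldl_fanLoop]
    have := pvCrux ci [] 0 0 0 rfl (by simp) (by omega)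
    simp only [pvTri, List.nil_append] at this
    simp [this]
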